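-- pv_equiv track=rewrite | github.com/juan2005elpapu/webjanaypedidos | project/orders/services/wompi.py | detect_wompi_key_environment
-- ===== SOURCE A (Python) =====
-- from typing import Any, Dict, Iterable, Optional, Tuple
--
-- def normalize_wompi_key(key: Optional[str]) -> str:
--     """Elimina espacios en blanco comunes de una llave de Wompi."""
--
--     return (key or '').strip()
--
-- def detect_wompi_key_environment(key: Optional[str]) -> Optional[str]:
--     """Intenta inferir si una llave es de pruebas o producción."""
--
--     normalized = normalize_wompi_key(key)
--     if not normalized:
--         return None
--
--     prefixes: Dict[str, Iterable[str]] = {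
--         'test': ('pub_test', 'prv_test', 'evn_test', 'integrity_test'),
--         'production': ('pub_prod', 'prv_prod', 'evn_prod', 'integrity_prod'),
--     }
--     for env, env_prefixes in prefixes.items():
--         if any(normalized.startswith(prefix) for prefix in env_prefixes):
--             return env
--     return None
-- ===== SOURCE B (Python) =====
-- from typing import Optional
--
-- _KEY_TYPES = {'pub', 'prv', 'evn', 'integrity'}
--
-- def detect_wompi_key_environment(key: Optional[str]) -> Optional[str]:
--     head, sep, env = ((key or '').strip()).partition('_')
--     if not sep or head not in _KEY_TYPES:
--         return None
--     if env.startswith('test'):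
--         return 'test'
--     if env.startswith('prod'):
--         return 'production'
--     return None
-- ===== Notes on version B (the rewrite author's own statement) =====
-- stated objective: simpler
-- what changed: B partitions the normalized key at its first underscore into a (type, environment) pair and classifies head in {pub,prv,evn,integrity} plus environment prefix test/prod, instead of A's scan over a dict of eight concatenated startswith prefixes.
import Mathlib
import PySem

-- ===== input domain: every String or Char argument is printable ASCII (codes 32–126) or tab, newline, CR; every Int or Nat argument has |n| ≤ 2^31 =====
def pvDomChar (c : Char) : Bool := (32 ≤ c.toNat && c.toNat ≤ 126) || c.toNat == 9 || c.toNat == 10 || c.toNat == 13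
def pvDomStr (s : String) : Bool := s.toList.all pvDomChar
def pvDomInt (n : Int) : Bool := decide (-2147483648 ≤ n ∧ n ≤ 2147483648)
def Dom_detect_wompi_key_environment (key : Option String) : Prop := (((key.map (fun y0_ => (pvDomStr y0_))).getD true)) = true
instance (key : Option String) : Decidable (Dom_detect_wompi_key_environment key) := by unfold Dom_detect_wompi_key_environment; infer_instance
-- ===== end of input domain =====

-- B classifies a Wompi key by partitioning at the first underscore into (type, env) instead of
-- scanning eight concatenated startswith prefixes; objective: simpler.


-- ===== PORT A =====
def normalize_wompi_key (key : Option String) : String :=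
  PySem.Str.strip (key.getD "")

-- the 'for env, env_prefixes in prefixes.items()' loop of A
def envScan (normalized : String) : List (String × List String) → Option String
  | [] => none
  | (env, ps) :: rest =>
    if ps.any (fun p => PySem.Str.startswith normalized p) then some env
    else envScan normalized rest

def detect_wompi_key_environment (key : Option String) : Option String :=
  let normalized := normalize_wompi_key key
  if normalized = "" then none
  else
    envScan normalized
      [("test", ["pub_test", "prv_test", "evn_test", "integrity_test"]),
       ("production", ["pub_prod", "prv_prod", "evn_prod", "integrity_prod"])]

-- ===== PORT B =====
-- hand port of s.partition('_') for the single-char separator '_': exact —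
-- none when '_' is absent (Python's (s, '', '')), some (head, tail) splits at the FIRST '_'
def partitionUnd : List Char → Option (List Char × List Char)
  | [] => none
  | c :: rest =>
    if c = '_' then some ([], rest)
    else (partitionUnd rest).map (fun p => (c :: p.1, p.2))

def keyTypes : List (List Char) := ["pub".toList, "prv".toList, "evn".toList, "integrity".toList]

def detect_wompi_key_environment_alt (key : Option String) : Option String :=
  match partitionUnd (PySem.Str.strip (key.getD "")).toList with
  | none => none
  | some (head, env) =>
    if keyTypes.contains head then
      if PySem.Chars.startswith env "test".toList then some "test"
      else if PySem.Chars.startswith env "prod".toList then some "production"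
      else none
    else none

-- ===== PRECONDITION & SPEC =====
def Spec_detect_wompi_key_environment (key : Option String) (out : Option String) : Prop := out = detect_wompi_key_environment_alt key
instance (key : Option String) (out : Option String) : Decidable (Spec_detect_wompi_key_environment key out) := by unfold Spec_detect_wompi_key_environment; infer_instance

-- ===== CLAIM (what is proved, stated in full; the proofs are below) =====
def Claim_equal_detect_wompi_key_environment : Prop := ∀ (key : Option String), Dom_detect_wompi_key_environment key → Spec_detect_wompi_key_environment key (detect_wompi_key_environment key)

-- ===== LEMMAS AND PROOFS =====

-- partitionUnd = none exactly when '_' is absent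
lemma partitionUnd_none {l : List Char} (h : partitionUnd l = none) : '_' ∉ l := by
  induction l with
  | nil => simp
  | cons c rest ih =>
    simp only [partitionUnd] at h
    by_cases hc : c = '_'
    · simp [hc] at h
    · simp only [hc, if_false, Option.map_eq_none_iff] at h
      intro hm
      rcases List.mem_cons.1 hm with h' | h'
      · exact hc h'.symm
      · exact ih h h'

-- partitionUnd splits at the first underscore
lemma partitionUnd_some {l h e : List Char} (hp : partitionUnd l = some (h, e)) :
    l = h ++ '_' :: e ∧ '_' ∉ h := by
  induction l generalizing h with
  | nil => simp [partitionUnd] at hp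
  | cons c rest ih =>
    simp only [partitionUnd] at hp
    by_cases hc : c = '_'
    · simp only [hc, if_true, Option.some.injEq, Prod.mk.injEq] at hp
      simp [← hp.1, ← hp.2, hc]
    · simp only [hc, if_false] at hp
      cases hq : partitionUnd rest with
      | none => simp [hq] at hp
      | some q =>
        rw [hq, Option.map_some, Option.some.injEq, Prod.mk.injEq] at hp
        obtain ⟨hhd, he⟩ := hp
        subst he
        obtain ⟨h1, h2⟩ := ih (h := q.1) (by rw [hq])
        subst hhd
        refine ⟨by simp [h1], ?_⟩
        intro hm
        rcases List.mem_cons.1 hm with h' | h'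
        · exact hc h'.symm
        · exact h2 h'

-- a prefix is made of members
lemma startswith_mem {l p : List Char} (h : PySem.Chars.startswith l p = true) :
    ∀ c ∈ p, c ∈ l := by
  intro c hc
  exact ((PySem.Chars.startswith_iff l p).1 h).mem hc

-- prefix matching across the first '_' on both sides, Prop level
lemma split_prefix (h t e p : List Char) (hh : '_' ∉ h) (ht : '_' ∉ t) :
    (t ++ '_' :: p <+: h ++ '_' :: e) ↔ (t = h ∧ p <+: e) := by
  induction h generalizing t with
  | nil =>
    cases t with
    | nil => simp [List.cons_prefix_cons]
    | cons d t' =>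
      have hd : d ≠ '_' := fun h' => ht (by simp [h'])
      simp [List.cons_prefix_cons, hd]
  | cons c h' ih =>
    have hc : c ≠ '_' := fun h' => hh (by simp [h'])
    cases t with
    | nil =>
      simp [List.cons_prefix_cons, Ne.symm hc]
    | cons d t' =>
      have hh' : '_' ∉ h' := fun m => hh (by simp [m])
      have ht' : '_' ∉ t' := fun m => ht (by simp [m])
      simp [List.cons_prefix_cons, ih t' hh' ht', List.cons.injEq, and_assoc]

-- the crux, Bool level: matching 'type_env' against a string split at its first '_'
lemma startswith_split (h t e p : List Char) (hh : '_' ∉ h) (ht : '_' ∉ t) :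
    PySem.Chars.startswith (h ++ '_' :: e) (t ++ '_' :: p)
      = (h == t && PySem.Chars.startswith e p) := by
  rw [Bool.eq_iff_iff]
  rw [PySem.Chars.startswith_iff, Bool.and_eq_true, beq_iff_eq,
    PySem.Chars.startswith_iff, split_prefix h t e p hh ht]
  constructor
  · rintro ⟨h1, h2⟩; exact ⟨h1.symm, h2⟩
  · rintro ⟨h1, h2⟩; exact ⟨h1.symm, h2⟩

-- char-level core equivalence of the two bodies
lemma core_eq (s : String) :
    (if s = "" then none
     else envScan s
        [("test", ["pub_test", "prv_test", "evn_test", "integrity_test"]),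
         ("production", ["pub_prod", "prv_prod", "evn_prod", "integrity_prod"])])
    = (match partitionUnd s.toList with
       | none => none
       | some (head, env) =>
         if keyTypes.contains head then
           if PySem.Chars.startswith env "test".toList then some "test"
           else if PySem.Chars.startswith env "prod".toList then some "production"
           else none
         else none) := by
  cases hp : partitionUnd s.toList with
  | none =>
    have hu := partitionUnd_none hp
    have hf : ∀ p : List Char, '_' ∈ p → PySem.Chars.startswith s.toList p = false := by
      intro p hm
      cases hb : PySem.Chars.startswith s.toList p with
      | false => rfl
      | true => exact absurd (startswith_mem hb '_' hm) hu
    simp only [envScan, List.any_cons, List.any_nil, PySem.Str.startswith_eq]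
    rw [hf "pub_test".toList (by decide), hf "prv_test".toList (by decide),
        hf "evn_test".toList (by decide), hf "integrity_test".toList (by decide),
        hf "pub_prod".toList (by decide), hf "prv_prod".toList (by decide),
        hf "evn_prod".toList (by decide), hf "integrity_prod".toList (by decide)]
    simp
  | some q =>
    obtain ⟨head, env⟩ := q
    obtain ⟨hs, hh⟩ := partitionUnd_some hp
    have hne : s ≠ "" := by
      intro h0
      rw [h0] at hs
      simp at hs
    have key8 : ∀ (t p : List Char), '_' ∉ t →
        PySem.Chars.startswith s.toList (t ++ '_' :: p)
          = (head == t && PySem.Chars.startswith env p) := by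
      intro t p ht
      rw [hs]
      exact startswith_split head t env p hh ht
    have e1 : PySem.Chars.startswith s.toList "pub_test".toList
        = (head == "pub".toList && PySem.Chars.startswith env "test".toList) := by
      rw [show ("pub_test" : String).toList = "pub".toList ++ '_' :: "test".toList from by decide]
      exact key8 _ _ (by decide)
    have e2 : PySem.Chars.startswith s.toList "prv_test".toList
        = (head == "prv".toList && PySem.Chars.startswith env "test".toList) := by
      rw [show ("prv_test" : String).toList = "prv".toList ++ '_' :: "test".toList from by decide]
      exact key8 _ _ (by decide)
    have e3 : PySem.Chars.startswith s.toList "evn_test".toList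
        = (head == "evn".toList && PySem.Chars.startswith env "test".toList) := by
      rw [show ("evn_test" : String).toList = "evn".toList ++ '_' :: "test".toList from by decide]
      exact key8 _ _ (by decide)
    have e4 : PySem.Chars.startswith s.toList "integrity_test".toList
        = (head == "integrity".toList && PySem.Chars.startswith env "test".toList) := by
      rw [show ("integrity_test" : String).toList = "integrity".toList ++ '_' :: "test".toList from by decide]
      exact key8 _ _ (by decide)
    have e5 : PySem.Chars.startswith s.toList "pub_prod".toList
        = (head == "pub".toList && PySem.Chars.startswith env "prod".toList) := by
      rw [show ("pub_prod" : String).toList = "pub".toList ++ '_' :: "prod".toList from by decide]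
      exact key8 _ _ (by decide)
    have e6 : PySem.Chars.startswith s.toList "prv_prod".toList
        = (head == "prv".toList && PySem.Chars.startswith env "prod".toList) := by
      rw [show ("prv_prod" : String).toList = "prv".toList ++ '_' :: "prod".toList from by decide]
      exact key8 _ _ (by decide)
    have e7 : PySem.Chars.startswith s.toList "evn_prod".toList
        = (head == "evn".toList && PySem.Chars.startswith env "prod".toList) := by
      rw [show ("evn_prod" : String).toList = "evn".toList ++ '_' :: "prod".toList from by decide]
      exact key8 _ _ (by decide)
    have e8 : PySem.Chars.startswith s.toList "integrity_prod".toList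
        = (head == "integrity".toList && PySem.Chars.startswith env "prod".toList) := by
      rw [show ("integrity_prod" : String).toList = "integrity".toList ++ '_' :: "prod".toList from by decide]
      exact key8 _ _ (by decide)
    rw [if_neg hne]
    simp only [envScan, List.any_cons, List.any_nil, PySem.Str.startswith_eq]
    rw [e1, e2, e3, e4, e5, e6, e7, e8]
    by_cases p1 : head = ['p', 'u', 'b'] <;>
    by_cases p2 : head = ['p', 'r', 'v'] <;>
    by_cases p3 : head = ['e', 'v', 'n'] <;>
    by_cases p4 : head = ['i', 'n', 't', 'e', 'g', 'r', 'i', 't', 'y'] <;>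
    cases hT : PySem.Chars.startswith env "test".toList <;>
    cases hP : PySem.Chars.startswith env "prod".toList <;>
    simp [keyTypes, p1, p2, p3, p4, hT, hP]

-- ===== VERDICT (by name: the statement is the Claim_ definition above) =====
theorem detect_wompi_key_environment_spec : Claim_equal_detect_wompi_key_environment := by
  intro key _
  unfold Spec_detect_wompi_key_environment detect_wompi_key_environment
    detect_wompi_key_environment_alt normalize_wompi_key
  exact core_eq (PySem.Str.strip (key.getD ""))
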